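-- pv_equiv track=rewrite | github.com/AlexandruSte/100Challenge | Paduraru Dana/6_valuable_character.py | most_valuable_character
-- ===== SOURCE A (Python) =====
-- def most_valuable_character(string):
--     max_value = -1
--     valuable_ch = ''
--     for ch in string:
--         value = string.rfind(ch) - string.find(ch)
--         if value == max_value and ch < valuable_ch:
--             valuable_ch = ch
--         elif value > max_value:
--             max_value = value
--             valuable_ch = ch
--     return valuable_ch
-- ===== SOURCE B (Python) =====
-- def most_valuable_character(string):
--     spans = {}
--     for i, ch in enumerate(string):
--         spans[ch] = (spans.get(ch, (i, i))[0], i)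
--     best = None
--     for ch, (first, last) in spans.items():
--         key = (last - first, -ord(ch))
--         if best is None or key > best[0]:
--             best = (key, ch)
--     return best[1] if best is not None else ''
-- ===== Notes on version B (the rewrite author's own statement) =====
-- stated objective: faster
-- what changed: A rescans the string with rfind/find for every character occurrence and keeps a hand-rolled running max; B makes one pass building a dict of (first_index, last_index) per character and then picks the best over the distinct characters with a single lexicographic max on (last-first, -ord(ch)).
import Mathlib
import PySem

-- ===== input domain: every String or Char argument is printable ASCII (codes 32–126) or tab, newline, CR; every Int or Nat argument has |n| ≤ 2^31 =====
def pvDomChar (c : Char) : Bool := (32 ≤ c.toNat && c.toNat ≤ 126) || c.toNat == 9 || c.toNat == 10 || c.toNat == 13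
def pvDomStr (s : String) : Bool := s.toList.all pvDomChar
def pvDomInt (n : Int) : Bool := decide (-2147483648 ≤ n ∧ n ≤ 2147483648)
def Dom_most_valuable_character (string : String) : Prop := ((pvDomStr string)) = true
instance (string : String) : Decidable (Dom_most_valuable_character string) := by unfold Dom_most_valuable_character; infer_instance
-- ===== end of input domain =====

-- B replaces A's O(n^2) per-character rfind/find scans by a single pass building a
-- first/last-index table and one max-selection pass over the distinct characters.

-- ===== PORT A =====
-- loop body of A: value = string.rfind(ch) - string.find(ch); branch exactly as in A
def pvStepA (string : String) (st : Int × String) (ch : Char) : Int × String :=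
  let value : Int :=
    PySem.Str.rfind string (String.ofList [ch]) - PySem.Str.find string (String.ofList [ch])
  if value = st.1 ∧ String.ofList [ch] < st.2 then (st.1, String.ofList [ch])
  else if value > st.1 then (value, String.ofList [ch])
  else st

def most_valuable_character (string : String) : String :=
  (string.toList.foldl (pvStepA string) (-1, "")).2

-- ===== PORT B =====
-- spans[ch] = (spans.get(ch, (i, i))[0], i)
def pvStepSpan (d : PySem.Dict Char (Int × Int)) (p : Int × Char) : PySem.Dict Char (Int × Int) :=
  d.insert p.2 ((d.getD p.2 (p.1, p.1)).1, p.1)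

-- Python tuple comparison key > best[0] on (Int, Int): lexicographic (ported by hand, exact)
def pvKeyGT (k k' : Int × Int) : Bool := decide (k'.1 < k.1) || (k.1 == k'.1 && decide (k'.2 < k.2))

-- selection loop body: key = (last - first, -ord(ch)); keep the larger key
def pvStepSel (acc : Option ((Int × Int) × Char)) (p : Char × (Int × Int)) :
    Option ((Int × Int) × Char) :=
  let key : Int × Int := (p.2.2 - p.2.1, -(p.1.toNat : Int))
  match acc with
  | none => some (key, p.1)
  | some b => if pvKeyGT key b.1 then some (key, p.1) else some b

def most_valuable_character_alt (string : String) : String :=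
  let spans : PySem.Dict Char (Int × Int) :=
    (PySem.List.enumerate string.toList).foldl pvStepSpan PySem.Dict.empty
  match spans.items.foldl pvStepSel none with
  | some b => String.ofList [b.2]
  | none => ""

-- ===== PRECONDITION & SPEC =====
def Spec_most_valuable_character (string : String) (out : String) : Prop := out = most_valuable_character_alt string
instance (string : String) (out : String) : Decidable (Spec_most_valuable_character string out) := by unfold Spec_most_valuable_character; infer_instance

-- ===== CLAIM (what is proved, stated in full; the proofs are below) =====
def Claim_equal_most_valuable_character : Prop := ∀ (string : String), Dom_most_valuable_character string → Spec_most_valuable_character string (most_valuable_character string)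

-- ===== LEMMAS AND PROOFS =====

-- value A computes for a character c of the string
def pvV (l : List Char) (c : Char) : Int :=
  PySem.Chars.rfind l [c] - PySem.Chars.find l [c]

-- index of the last occurrence of c in l (-1 if absent)
def pvLastOcc (l : List Char) (c : Char) : Int :=
  if c ∈ l then ((l.length - 1 - l.reverse.idxOf c : Nat) : Int) else -1

-- "c beats b" in A's running max: strictly larger value, or equal value and smaller char
def pvBetter (v : Char → Int) (c b : Char) : Prop := v b < v c ∨ (v c = v b ∧ c < b)

theorem pv_singleton_lt (a b : Char) : String.ofList [a] < String.ofList [b] ↔ a < b := by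
  rw [String.lt_iff_toList_lt]
  simp only [String.toList_ofList]
  constructor
  · intro h
    cases h with
    | rel h => exact h
    | cons h => cases h
  · intro h
    exact List.Lex.rel h

theorem pv_char_lt_iff (a b : Char) : a < b ↔ (a.toNat : Int) < (b.toNat : Int) := by
  rw [Char.lt_def, UInt32.lt_iff_toNat_lt]
  constructor
  · intro h; exact_mod_cast h
  · intro h; exact_mod_cast h

-- ---- characterisation of find / rfind on a single-character needle ----

theorem pv_find_go_single (c : Char) (l : List Char) (k : Nat) :
    PySem.Chars.find.go [c] l k = if c ∈ l then ((k + l.idxOf c : Nat) : Int) else -1 := by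
  induction l generalizing k with
  | nil => simp [PySem.Chars.find.go]
  | cons h t ih =>
      rw [PySem.Chars.find.go]
      by_cases hc : c = h
      · subst hc
        simp [List.isPrefixOf, List.idxOf_cons]
      · have : [c].isPrefixOf (h :: t) = false := by
          simp [List.isPrefixOf, hc]
        rw [this]
        simp only [Bool.false_eq_true, if_false, ih]
        by_cases hm : c ∈ t
        · simp [hm, hc, List.idxOf_cons, Ne.symm hc]
          omega
        · simp [hm, hc]

theorem pv_find_single (l : List Char) (c : Char) :
    PySem.Chars.find l [c] = if c ∈ l then ((l.idxOf c : Nat) : Int) else -1 := by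
  rw [PySem.Chars.find, pv_find_go_single]
  simp


theorem pv_rfind_go_congr (c : Char) (n : Nat) (s s' : List Char)
    (h : ∀ j ≤ n, [c].isPrefixOf (s.drop j) = [c].isPrefixOf (s'.drop j)) :
    PySem.Chars.rfind.go s [c] n = PySem.Chars.rfind.go s' [c] n := by
  induction n with
  | zero =>
      rw [PySem.Chars.rfind.go, PySem.Chars.rfind.go]
      have := h 0 (Nat.le_refl 0)
      simp at this
      rw [this]
  | succ m ih =>
      rw [PySem.Chars.rfind.go, PySem.Chars.rfind.go]
      rw [h (m + 1) (Nat.le_refl _)]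
      rw [ih (fun j hj => h j (Nat.le_succ_of_le hj))]

theorem pv_rfind_go_zero (s sub : List Char) :
    PySem.Chars.rfind.go s sub 0 = if sub.isPrefixOf s then (0 : Int) else -1 := by
  rw [PySem.Chars.rfind.go]

theorem pv_rfind_go_succ (s sub : List Char) (j : Nat) :
    PySem.Chars.rfind.go s sub (j + 1) =
      if sub.isPrefixOf (s.drop (j + 1)) then ((j + 1 : Nat) : Int)
      else PySem.Chars.rfind.go s sub j := by
  rw [PySem.Chars.rfind.go]

theorem pv_rfind_append (l : List Char) (x c : Char) :
    PySem.Chars.rfind (l ++ [x]) [c] =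
      if x = c then ((l.length : Nat) : Int) else PySem.Chars.rfind l [c] := by
  rw [PySem.Chars.rfind, PySem.Chars.rfind]
  have hlen : (l ++ [x]).length = l.length + 1 := by simp
  rw [hlen, pv_rfind_go_succ]
  have hdropall : (l ++ [x]).drop (l.length + 1) = [] := by simp
  rw [hdropall]
  simp only [List.isPrefixOf, Bool.false_eq_true, if_false]
  have hpref1 : ([c].isPrefixOf [x] : Bool) = decide (x = c) := by
    by_cases h : x = c
    · simp [h, List.isPrefixOf]
    · have : (c == x) = false := by simp [Ne.symm h]
      simp [List.isPrefixOf, this, h]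
  cases hl : l with
  | nil =>
      subst hl
      simp only [List.length_nil, List.nil_append]
      rw [pv_rfind_go_zero, pv_rfind_go_zero, hpref1]
      by_cases h : x = c
      · simp [h]
      · simp [h, List.isPrefixOf]
  | cons h t =>
      rw [← hl]
      have hlpos : 0 < l.length := by rw [hl]; simp
      obtain ⟨m, hm⟩ : ∃ m, l.length = m + 1 := ⟨l.length - 1, by omega⟩
      rw [hm, pv_rfind_go_succ]
      have hdropL : (l ++ [x]).drop (m + 1) = [x] := by
        rw [List.drop_append_of_le_length (by omega)]
        rw [List.drop_of_length_le (by omega)]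
        simp
      rw [hdropL, hpref1]
      by_cases hxc : x = c
      · simp [hxc, hm]
      · simp only [hxc, decide_false, Bool.false_eq_true, if_false]
        rw [pv_rfind_go_succ]
        have : l.drop (m + 1) = [] := by rw [List.drop_of_length_le (by omega)]
        rw [this]
        simp only [List.isPrefixOf, Bool.false_eq_true, if_false]
        apply pv_rfind_go_congr
        intro j hj
        have hjlt : j < l.length := by omega
        rw [List.drop_append_of_le_length (by omega)]
        rcases hd : l.drop j with _ | ⟨y, ys⟩
        · exfalso
          have := List.length_drop (l := l) (i := j)
          rw [hd] at this
          simp at this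
          omega
        · simp [List.isPrefixOf]

theorem pv_lastOcc_append (l : List Char) (x c : Char) :
    pvLastOcc (l ++ [x]) c = if x = c then ((l.length : Nat) : Int) else pvLastOcc l c := by
  unfold pvLastOcc
  rcases eq_or_ne x c with rfl | hxc
  · have hmem : x ∈ l ++ [x] := by simp
    rw [if_pos hmem, if_pos rfl]
    simp [List.idxOf_cons]
  · rw [if_neg hxc]
    have hmem : c ∈ l ++ [x] ↔ c ∈ l := by simp [Ne.symm hxc]
    by_cases hcl : c ∈ l
    · rw [if_pos (hmem.mpr hcl), if_pos hcl]
      have hbeq : (x == c) = false := by simp [hxc]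
      simp only [List.reverse_append, List.reverse_cons, List.reverse_nil, List.nil_append,
        List.singleton_append, List.idxOf_cons, hbeq, Bool.cond_false, List.length_append,
        List.length_cons, List.length_nil]
      congr 1
      omega
    · rw [if_neg (fun h => hcl (hmem.mp h)), if_neg hcl]

theorem pv_rfind_single (l : List Char) (c : Char) :
    PySem.Chars.rfind l [c] = pvLastOcc l c := by
  induction l using List.reverseRecOn with
  | nil =>
      rw [PySem.Chars.rfind]
      simp only [List.length_nil]
      rw [PySem.Chars.rfind.go]
      simp [List.isPrefixOf, pvLastOcc]
  | append_singleton l x ih =>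
      rw [pv_rfind_append, pv_lastOcc_append, ih]

theorem pv_idxOf_le_lastOcc (l : List Char) (c : Char) (h : c ∈ l) :
    ((l.idxOf c : Nat) : Int) ≤ pvLastOcc l c := by
  induction l using List.reverseRecOn with
  | nil => cases h
  | append_singleton l x ih =>
      rw [pv_lastOcc_append]
      rcases eq_or_ne x c with rfl | hxc
      · rw [if_pos rfl, List.idxOf_append]
        by_cases hcl : x ∈ l
        · have := List.idxOf_lt_length_of_mem hcl
          rw [if_pos hcl]
          exact_mod_cast Nat.le_of_lt this
        · simp [hcl]
      · have hcl : c ∈ l := by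
          rcases List.mem_append.mp h with h' | h'
          · exact h'
          · simp at h'; exact absurd h'.symm hxc
        rw [if_neg hxc, List.idxOf_append, if_pos hcl]
        exact ih hcl

theorem pv_v_nonneg (l : List Char) (c : Char) (h : c ∈ l) : 0 ≤ pvV l c := by
  unfold pvV
  rw [pv_find_single, pv_rfind_single]
  simp only [h, if_true]
  have := pv_idxOf_le_lastOcc l c h
  omega

-- ---- the span dictionary built by B ----

theorem pv_span_get (l : List Char) (c : Char) :
    ((PySem.List.enumerate l).foldl pvStepSpan PySem.Dict.empty).get? c =
      if c ∈ l then some (((l.idxOf c : Nat) : Int), pvLastOcc l c) else none := by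
  induction l using List.reverseRecOn with
  | nil => simp [PySem.List.enumerate, PySem.Dict.get?_empty]
  | append_singleton l x ih =>
      rw [PySem.List.enumerate_append]
      rw [List.foldl_append]
      have hstep : ∀ d, List.foldl pvStepSpan d (PySem.List.enumerate [x] (0 + ↑l.length)) =
          pvStepSpan d (0 + (l.length : Int), x) := by
        intro d
        simp [PySem.List.enumerate]
      rw [hstep]
      simp only [pvStepSpan]
      rw [PySem.Dict.get?_insert]
      by_cases hcx : c = x
      · subst hcx
        simp only [if_true]
        rw [PySem.Dict.getD_eq_get?_getD, ih]
        by_cases hcl : c ∈ l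
        · have hmem : c ∈ l ++ [c] := by simp
          simp only [hcl, if_true, Option.getD_some, hmem]
          rw [pv_lastOcc_append]
          simp only [if_true]
          rw [List.idxOf_append]
          simp [hcl]
        · have hmem : c ∈ l ++ [c] := by simp
          simp only [hcl, Bool.false_eq_true, if_false, Option.getD_none, hmem, if_true]
          rw [pv_lastOcc_append]
          simp only [if_true]
          rw [List.idxOf_append]
          simp [hcl]
      · rw [if_neg hcx, ih]
        have hmem : c ∈ l ++ [x] ↔ c ∈ l := by simp [hcx]
        rw [pv_lastOcc_append]
        by_cases hcl : c ∈ l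
        · simp only [hmem, hcl, if_true]
          rw [List.idxOf_append]
          simp [hcl, Ne.symm hcx, hcx]
        · simp [hmem, hcl]

theorem pv_span_keys_nodup (l : List Char) :
    ((PySem.List.enumerate l).foldl pvStepSpan PySem.Dict.empty).keys.Nodup := by
  have : pvStepSpan = fun (d : PySem.Dict Char (Int × Int)) (p : Int × Char) =>
      d.insert p.2 ((d.getD p.2 (p.1, p.1)).1, p.1) := rfl
  rw [this]
  exact PySem.Dict.nodup_keys_foldl_insert_key _ (fun p : Int × Char => p.2)
    (fun d p => ((d.getD p.2 (p.1, p.1)).1, p.1)) _ PySem.Dict.nodup_keys_empty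

-- ---- order facts ----

theorem pv_better_irrefl (v : Char → Int) (c : Char) : ¬ pvBetter v c c := by
  unfold pvBetter
  rintro (h | ⟨_, h⟩)
  · omega
  · exact lt_irrefl _ h

theorem pv_better_total (v : Char → Int) (c b : Char) (h : c ≠ b) :
    pvBetter v c b ∨ pvBetter v b c := by
  unfold pvBetter
  rcases lt_trichotomy (v c) (v b) with h' | h' | h'
  · right; left; exact h'
  · rcases lt_or_gt_of_ne h with hc | hc
    · left; right; exact ⟨h', hc⟩
    · right; right; exact ⟨h'.symm, hc⟩
  · left; left; exact h'

theorem pv_keyGT_iff (v : Char → Int) (c b : Char) :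
    pvKeyGT (v c, -(c.toNat : Int)) (v b, -(b.toNat : Int)) = true ↔ pvBetter v c b := by
  unfold pvKeyGT pvBetter
  rw [pv_char_lt_iff]
  simp only [Bool.or_eq_true, Bool.and_eq_true, decide_eq_true_eq, beq_iff_eq]
  constructor
  · rintro (h | ⟨h1, h2⟩)
    · left; exact h
    · right; exact ⟨h1, by omega⟩
  · rintro (h | ⟨h1, h2⟩)
    · left; exact h
    · right; exact ⟨h1, by omega⟩

-- ---- A's fold: running max with tie to the smaller character ----

theorem pv_stepA_eq (string : String) :
    pvStepA string = fun (st : Int × String) (ch : Char) =>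
      if pvV string.toList ch = st.1 ∧ String.ofList [ch] < st.2 then (st.1, String.ofList [ch])
      else if pvV string.toList ch > st.1 then (pvV string.toList ch, String.ofList [ch])
      else st := by
  funext st ch
  unfold pvStepA pvV
  simp

theorem pv_foldA_inv (v : Char → Int) (rest : List Char) :
    ∀ (b : Char),
      ∃ b', (rest.foldl (fun (st : Int × String) ch =>
          if v ch = st.1 ∧ String.ofList [ch] < st.2 then (st.1, String.ofList [ch])
          else if v ch > st.1 then (v ch, String.ofList [ch])
          else st) (v b, String.ofList [b])) = (v b', String.ofList [b']) ∧
        (b' = b ∨ b' ∈ rest) ∧ ∀ c, (c = b ∨ c ∈ rest) → ¬ pvBetter v c b' := by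
  induction rest with
  | nil =>
      intro b
      refine ⟨b, rfl, Or.inl rfl, ?_⟩
      rintro c (rfl | hc)
      · exact pv_better_irrefl v c
      · cases hc
  | cons p t ih =>
      intro b
      simp only [List.foldl_cons]
      by_cases h1 : v p = v b ∧ String.ofList [p] < String.ofList [b]
      · rw [if_pos h1]
        have hpb : String.ofList [p] < String.ofList [b] := h1.2
        have hplt : p < b := (pv_singleton_lt p b).mp hpb
        have hst : ((v b : Int), String.ofList [p]) = (v p, String.ofList [p]) := by
          rw [h1.1]
        rw [hst]
        obtain ⟨b', hfold, hmem, hdom⟩ := ih p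
        refine ⟨b', hfold, ?_, ?_⟩
        · rcases hmem with rfl | hm
          · exact Or.inr (List.mem_cons_self)
          · exact Or.inr (List.mem_cons_of_mem _ hm)
        · rintro c (rfl | hc)
          · -- c = b: not better than b' since p ≤ b' and b > p
            intro hcb
            have hnp := hdom p (Or.inl rfl)
            unfold pvBetter at hcb hnp
            rcases hcb with hlt | ⟨heq, hlt⟩
            · exact hnp (Or.inl (by omega))
            · apply hnp
              right
              exact ⟨by omega, lt_trans hplt hlt⟩
          · rcases List.mem_cons.mp hc with rfl | hc
            · exact hdom c (Or.inl rfl)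
            · exact hdom c (Or.inr hc)
      · rw [if_neg h1]
        by_cases h2 : v p > v b
        · rw [if_pos h2]
          obtain ⟨b', hfold, hmem, hdom⟩ := ih p
          refine ⟨b', hfold, ?_, ?_⟩
          · rcases hmem with rfl | hm
            · exact Or.inr (List.mem_cons_self)
            · exact Or.inr (List.mem_cons_of_mem _ hm)
          · rintro c (rfl | hc)
            · intro hcb
              have hnp := hdom p (Or.inl rfl)
              unfold pvBetter at hcb hnp
              rcases hcb with hlt | ⟨heq, hlt⟩
              · exact hnp (Or.inl (by omega))
              · exact hnp (Or.inl (by omega))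
            · rcases List.mem_cons.mp hc with rfl | hc
              · exact hdom c (Or.inl rfl)
              · exact hdom c (Or.inr hc)
        · rw [if_neg h2]
          obtain ⟨b', hfold, hmem, hdom⟩ := ih b
          refine ⟨b', hfold, ?_, ?_⟩
          · rcases hmem with rfl | hm
            · exact Or.inl rfl
            · exact Or.inr (List.mem_cons_of_mem _ hm)
          · rintro c (rfl | hc)
            · exact hdom c (Or.inl rfl)
            · rcases List.mem_cons.mp hc with rfl | hc
              · -- c = p: p did not beat b, and b' is at least as good as b
                intro hcb
                have hnb := hdom b (Or.inl rfl)
                unfold pvBetter at hcb hnb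
                have hpb : ¬ (v b < v c) := h2
                rcases hcb with hlt | ⟨heq, hlt⟩
                · -- v b' < v c ≤ v b
                  apply hnb
                  left
                  omega
                · -- v c = v b' and c < b'
                  by_cases hvb : v c = v b
                  · have hnl : ¬ (String.ofList [c] < String.ofList [b]) := fun hx => h1 ⟨hvb, hx⟩
                    rw [pv_singleton_lt] at hnl
                    apply hnb
                    right
                    constructor
                    · omega
                    · exact lt_of_le_of_lt (not_lt.mp hnl) hlt
                  · apply hnb
                    left
                    omega
              · exact hdom c (Or.inr hc)

-- ---- B's selection fold ----

theorem pv_better_chain (v : Char → Int) {p b b' : Char}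
    (hpb : pvBetter v p b) (hnp : ¬ pvBetter v p b') : ¬ pvBetter v b b' := by
  unfold pvBetter at *
  rintro (h | ⟨he, hl⟩) <;> rcases hpb with h2 | ⟨he2, hl2⟩
  · exact hnp (Or.inl (by omega))
  · exact hnp (Or.inl (by omega))
  · exact hnp (Or.inl (by omega))
  · exact hnp (Or.inr ⟨by omega, lt_trans hl2 hl⟩)

theorem pv_better_chain2 (v : Char → Int) {p b b' : Char}
    (hnpb : ¬ pvBetter v p b) (hnb : ¬ pvBetter v b b') : ¬ pvBetter v p b' := by
  unfold pvBetter at *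
  push Not at hnpb hnb
  rintro (h | ⟨he, hl⟩)
  · omega
  · have h1 : v p ≤ v b := hnpb.1
    have h2 : v b ≤ v b' := hnb.1
    have hba : b ≤ p := hnpb.2 (by omega)
    have hbb : b' ≤ b := hnb.2 (by omega)
    exact absurd hl (not_lt.mpr (le_trans hbb hba))

theorem pv_foldSel_inv (v : Char → Int) :
    ∀ (its : List (Char × (Int × Int))), (∀ p ∈ its, p.2.2 - p.2.1 = v p.1) →
    ∀ (b : Char),
      ∃ b', its.foldl pvStepSel (some ((v b, -(b.toNat : Int)), b)) =
          some ((v b', -(b'.toNat : Int)), b') ∧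
        (b' = b ∨ b' ∈ its.map (·.1)) ∧
        ∀ c, (c = b ∨ c ∈ its.map (·.1)) → ¬ pvBetter v c b' := by
  intro its
  induction its with
  | nil =>
      intro _ b
      refine ⟨b, rfl, Or.inl rfl, ?_⟩
      rintro c (rfl | hc)
      · exact pv_better_irrefl v c
      · cases hc
  | cons p rest ih =>
      intro hits b
      have hits' : ∀ q ∈ rest, q.2.2 - q.2.1 = v q.1 :=
        fun q hq => hits q (List.mem_cons_of_mem _ hq)
      have hk : p.2.2 - p.2.1 = v p.1 := hits p List.mem_cons_self
      simp only [List.foldl_cons, pvStepSel, hk]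
      by_cases hgt : pvKeyGT (v p.1, -(p.1.toNat : Int)) (v b, -(b.toNat : Int)) = true
      · rw [if_pos hgt]
        have hbet : pvBetter v p.1 b := (pv_keyGT_iff v p.1 b).mp hgt
        obtain ⟨b', hfold, hmem, hdom⟩ := ih hits' p.1
        refine ⟨b', hfold, ?_, ?_⟩
        · rcases hmem with rfl | hm
          · exact Or.inr (by simp)
          · exact Or.inr (by simp only [List.map_cons, List.mem_cons]; exact Or.inr hm)
        · rintro c (rfl | hc)
          · exact pv_better_chain v hbet (hdom p.1 (Or.inl rfl))
          · rw [List.map_cons] at hc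
            rcases List.mem_cons.mp hc with rfl | hc'
            · exact hdom _ (Or.inl rfl)
            · exact hdom _ (Or.inr hc')
      · rw [if_neg hgt]
        have hnbet : ¬ pvBetter v p.1 b := fun hb => hgt ((pv_keyGT_iff v p.1 b).mpr hb)
        obtain ⟨b', hfold, hmem, hdom⟩ := ih hits' b
        refine ⟨b', hfold, ?_, ?_⟩
        · rcases hmem with rfl | hm
          · exact Or.inl rfl
          · exact Or.inr (by simp only [List.map_cons, List.mem_cons]; exact Or.inr hm)
        · rintro c (rfl | hc)
          · exact hdom c (Or.inl rfl)
          · rw [List.map_cons] at hc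
            rcases List.mem_cons.mp hc with rfl | hc'
            · exact pv_better_chain2 v hnbet (hdom b (Or.inl rfl))
            · exact hdom _ (Or.inr hc')

-- ---- the value function agrees with the span table ----

theorem pv_item_fact (l : List Char) (q : Char × (Int × Int))
    (hq : q ∈ ((PySem.List.enumerate l).foldl pvStepSpan PySem.Dict.empty).items) :
    q.1 ∈ l ∧ q.2.2 - q.2.1 = pvV l q.1 := by
  have hget := PySem.Dict.get?_of_mem_items _ (by exact hq) (pv_span_keys_nodup l)
  rw [pv_span_get] at hget
  by_cases hm : q.1 ∈ l
  · rw [if_pos hm] at hget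
    refine ⟨hm, ?_⟩
    have hq2 : q.2 = (((l.idxOf q.1 : Nat) : Int), pvLastOcc l q.1) := by
      injection hget with h; exact h.symm
    rw [hq2]
    unfold pvV
    rw [pv_find_single, pv_rfind_single, if_pos hm]
  · rw [if_neg hm] at hget
    cases hget

theorem pv_item_complete (l : List Char) (c : Char) (hc : c ∈ l) :
    c ∈ (((PySem.List.enumerate l).foldl pvStepSpan PySem.Dict.empty).items.map (·.1)) := by
  have hget := pv_span_get l c
  rw [if_pos hc] at hget
  exact List.mem_map.mpr ⟨_, PySem.Dict.mem_items_of_get?_eq_some _ hget, rfl⟩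

-- ===== VERDICT (by name: the statement is the Claim_ definition above) =====
theorem most_valuable_character_spec : Claim_equal_most_valuable_character := by
  unfold Claim_equal_most_valuable_character
  intro string _
  unfold Spec_most_valuable_character
  unfold most_valuable_character most_valuable_character_alt
  rw [pv_stepA_eq]
  cases hcase : string.toList with
  | nil => rfl
  | cons h t =>
      dsimp only
      have hvh : 0 ≤ pvV (h :: t) h := pv_v_nonneg _ _ List.mem_cons_self
      -- A's first step
      rw [List.foldl_cons]
      have hfirst :
          (if pvV (h :: t) h = ((-1 : Int), ("" : String)).1 ∧
              String.ofList [h] < ((-1 : Int), ("" : String)).2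
           then (((-1 : Int), ("" : String)).1, String.ofList [h])
           else if pvV (h :: t) h > ((-1 : Int), ("" : String)).1
           then (pvV (h :: t) h, String.ofList [h])
           else ((-1 : Int), ("" : String))) = (pvV (h :: t) h, String.ofList [h]) := by
        rw [if_neg, if_pos]
        · exact by omega
        · rintro ⟨h1, _⟩; omega
      rw [hfirst]
      obtain ⟨bA, hfoldA, hmemA, hdomA⟩ := pv_foldA_inv (pvV (h :: t)) t h
      rw [hfoldA]
      -- B's side
      have hnonempty := pv_item_complete (h :: t) h List.mem_cons_self
      cases hits : ((PySem.List.enumerate (h :: t)).foldl pvStepSpan PySem.Dict.empty).items with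
      | nil => rw [hits] at hnonempty; cases hnonempty
      | cons q rest =>
          have hfactq := pv_item_fact (h :: t) q (by rw [hits]; exact List.mem_cons_self)
          rw [List.foldl_cons]
          have hstep0 : pvStepSel none q = some ((pvV (h :: t) q.1, -(q.1.toNat : Int)), q.1) := by
            simp only [pvStepSel, hfactq.2]
          rw [hstep0]
          obtain ⟨bB, hfoldB, hmemB, hdomB⟩ :=
            pv_foldSel_inv (pvV (h :: t)) rest
              (fun p hp => (pv_item_fact (h :: t) p (by rw [hits]; exact List.mem_cons_of_mem _ hp)).2)
              q.1
          rw [hfoldB]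
          -- both are in the string and dominate the whole string
          have hmemsA : bA ∈ h :: t := by
            rcases hmemA with rfl | hm
            · exact List.mem_cons_self
            · exact List.mem_cons_of_mem _ hm
          have hmapmem : ∀ c, c ∈ List.map (·.1) (q :: rest) → c ∈ h :: t := by
            intro c hc
            rcases List.mem_map.mp hc with ⟨p, hp, hpe⟩
            exact hpe ▸ (pv_item_fact (h :: t) p (by rw [hits]; exact hp)).1
          have hmemsB : bB ∈ h :: t := by
            rcases hmemB with rfl | hm
            · exact hfactq.1
            · exact hmapmem bB (by simp only [List.map_cons, List.mem_cons]; exact Or.inr hm)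
          have hdomB' : ∀ c ∈ h :: t, ¬ pvBetter (pvV (h :: t)) c bB := by
            intro c hc
            have hcm : c ∈ List.map (·.1) (q :: rest) := by
              have := pv_item_complete (h :: t) c hc
              rw [hits] at this
              exact this
            rw [List.map_cons] at hcm
            rcases List.mem_cons.mp hcm with rfl | hc'
            · exact hdomB _ (Or.inl rfl)
            · exact hdomB _ (Or.inr hc')
          have hdomA' : ¬ pvBetter (pvV (h :: t)) bB bA := by
            rcases List.mem_cons.mp hmemsB with rfl | hm
            · exact hdomA bB (Or.inl rfl)
            · exact hdomA bB (Or.inr hm)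
          have heq : bA = bB := by
            rcases eq_or_ne bA bB with he | hne
            · exact he
            · rcases pv_better_total (pvV (h :: t)) bA bB hne with hb | hb
              · exact absurd hb (hdomB' bA hmemsA)
              · exact absurd hb hdomA'
          rw [heq]
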